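-- pv_equiv track=rewrite | github.com/ESPodmov/BotCinema | main.py | edit_year_list
-- ===== SOURCE A (Python) =====
-- year_groups = ["2000-2010", "1990-1999", "1980-1989", "1-1979"]
--
-- def edit_year_list(items, current_year_group):
--     length = len(current_year_group)
--     resulting_items = items.copy()
--     resulting_years = []
--     for i in range(len(current_year_group)):
--         current_years = str(current_year_group[length - i - 1])
--         current_years_list = current_years.split("-")
--         greatest_year = int(current_years_list[1])
--         start_len = len(resulting_items)
--         resulting_items = [item for item in resulting_items if int(item) > greatest_year]
--         end_len = len(resulting_items)
--         if end_len < start_len: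
--             resulting_years.insert(0, 1)
--         else:
--             resulting_years.insert(0, 0)
--     length = len(resulting_years)
--     resulting_items.sort(reverse=True)
--     for i in range(len(resulting_items)):
--         resulting_items[i] = {resulting_items[i]: resulting_items[i]}
--     for i in range(len(resulting_years)):
--         if resulting_years[i] == 1:
--             if i == (length - 1):
--                 resulting_items.append({"до 1980": "1-1979"})
--             else:
--                 resulting_items.append({year_groups[i]: year_groups[i]})
--     return resulting_items
-- ===== SOURCE B (Python) =====
-- year_groups = ["2000-2010", "1990-1999", "1980-1989", "1-1979"]
--
-- def edit_year_list(items, current_year_group):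
--     # One pass over thresholds builds a suffix-max table; items are then
--     # categorized directly instead of being re-filtered once per group.
--     thresholds = [int(g.split("-")[1]) for g in current_year_group]
--     suffix_max = []
--     m = None
--     for t in reversed(thresholds):
--         suffix_max.append(m)
--         m = t if m is None or t > m else m
--     suffix_max.reverse()
--     # m is now the max of all thresholds (None iff there are no groups)
--     survivors = [it for it in items if m is None or int(it) > m]
--     out = [{s: s} for s in sorted(survivors, reverse=True)]
--     n = len(thresholds)
--     for p in range(n):
--         sm = suffix_max[p]
--         if any((sm is None or int(it) > sm) and int(it) <= thresholds[p] for it in items):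
--             if p == n - 1:
--                 out.append({"до 1980": "1-1979"})
--             else:
--                 out.append({year_groups[p]: year_groups[p]})
--     return out
-- ===== Notes on version B (the rewrite author's own statement) =====
-- stated objective: alternative
-- what changed: Replaces A's repeated cumulative filter passes (one shrinking-list pass per year group, flags from length comparisons) with a suffix-max threshold table built in one backward pass and a direct band test per group over the original items.
import Mathlib
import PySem

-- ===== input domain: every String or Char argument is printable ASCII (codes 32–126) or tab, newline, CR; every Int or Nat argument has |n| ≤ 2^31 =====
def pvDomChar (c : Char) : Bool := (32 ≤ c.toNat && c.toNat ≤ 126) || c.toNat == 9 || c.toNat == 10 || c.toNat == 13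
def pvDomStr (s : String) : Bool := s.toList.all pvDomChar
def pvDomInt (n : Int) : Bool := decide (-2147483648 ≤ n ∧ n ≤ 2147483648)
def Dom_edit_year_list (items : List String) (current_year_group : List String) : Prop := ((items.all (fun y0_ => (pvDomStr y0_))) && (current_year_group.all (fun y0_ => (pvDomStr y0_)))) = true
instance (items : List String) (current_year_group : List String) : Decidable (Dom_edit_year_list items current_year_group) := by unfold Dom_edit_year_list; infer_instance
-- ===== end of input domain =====

-- B replaces A's repeated cumulative filter passes with a suffix-max threshold table and one
-- direct band test per group (objective: alternative; same asymptotic cost).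

-- Shared helpers: both Pythons evaluate the very same expressions int(s) and int(g.split("-")[1]);
-- the .getD defaults are never reached inside Pre_ (Python raises ValueError/IndexError there).
def pvInt (s : String) : Int := (PySem.Int.ofStr? s).getD 0
def pvThr (g : String) : Int := pvInt (PySem.List.pyGetD ((PySem.Str.split? g "-").getD []) 1 "")
def pvYearGroups : List String := ["2000-2010", "1990-1999", "1980-1989", "1-1979"]

-- ===== PORT A =====
-- body of A's first loop (filter pass over the remaining items, flag from the length comparison)
def pvLoopA1 (current_year_group : List String) (length : Int)
    (st : List String × List Int) (i : Int) : List String × List Int :=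
  let current_years := PySem.List.pyGetD current_year_group (length - i - 1) ""
  let greatest_year := pvThr current_years
  let start_len := st.1.length
  let resulting_items := st.1.filter (fun item => decide (pvInt item > greatest_year))
  let end_len := resulting_items.length
  (resulting_items, (if end_len < start_len then (1 : Int) else 0) :: st.2)

-- body of A's last loop (append a group dict for each set flag)
def pvLoopA2 (resulting_years : List Int) (length2 : Int)
    (acc : List (List (String × String))) (i : Int) : List (List (String × String)) :=
  if PySem.List.pyGetD resulting_years i 0 = 1 then
    if i = length2 - 1 then acc ++ [[("до 1980", "1-1979")]]
    else acc ++ [[(PySem.List.pyGetD pvYearGroups i "", PySem.List.pyGetD pvYearGroups i "")]]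
  else acc

def edit_year_list (items : List String) (current_year_group : List String) : List (List (String × String)) :=
  let length : Int := current_year_group.length
  let st := (PySem.List.pyRange 0 length 1).foldl (pvLoopA1 current_year_group length) (items, ([] : List Int))
  let resulting_items := (PySem.List.sorted st.1 (fun x => x) true).map (fun s => [(s, s)])
  let length2 : Int := st.2.length
  (PySem.List.pyRange 0 length2 1).foldl (pvLoopA2 st.2 length2) resulting_items

-- ===== PORT B =====
-- B-side helper: Python's 'sm is None or v > sm'
def pvGtOpt (v : Int) : Option Int → Bool
  | none => true
  | some m => decide (v > m)

-- body of B's suffix-max pass (over reversed thresholds; running max in .2)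
def pvLoopB1 (acc : List (Option Int) × Option Int) (t : Int) : List (Option Int) × Option Int :=
  (acc.1 ++ [acc.2], some (match acc.2 with | none => t | some m => if t > m then t else m))

-- body of B's band-test loop
def pvLoopB2 (items : List String) (suffix_max : List (Option Int)) (thresholds : List Int) (n : Int)
    (acc : List (List (String × String))) (p : Int) : List (List (String × String)) :=
  let sm := PySem.List.pyGetD suffix_max p none
  if items.any (fun it => pvGtOpt (pvInt it) sm && decide (pvInt it ≤ PySem.List.pyGetD thresholds p 0)) then
    if p = n - 1 then acc ++ [[("до 1980", "1-1979")]]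
    else acc ++ [[(PySem.List.pyGetD pvYearGroups p "", PySem.List.pyGetD pvYearGroups p "")]]
  else acc

def edit_year_list_alt (items : List String) (current_year_group : List String) : List (List (String × String)) :=
  let thresholds := current_year_group.map pvThr
  let pr := thresholds.reverse.foldl pvLoopB1 (([] : List (Option Int)), (none : Option Int))
  let suffix_max := pr.1.reverse
  let m := pr.2
  let survivors := items.filter (fun it => pvGtOpt (pvInt it) m)
  let out := (PySem.List.sorted survivors (fun x => x) true).map (fun s => [(s, s)])
  let n : Int := thresholds.length
  (PySem.List.pyRange 0 n 1).foldl (pvLoopB2 items suffix_max thresholds n) out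

-- ===== PRECONDITION & SPEC =====
-- Pre_ excludes (a) inputs where Python A raises: a year group without a parseable int between its
-- first and second '-', or, when groups exist, an item int() rejects; and (b) group lists longer than
-- the 4 global year_groups with nonempty items, where A can hit IndexError on year_groups — on the
-- inputs of (b) where A happens to return, both programs still agree (see claim cite).
def Pre_edit_year_list (items : List String) (current_year_group : List String) : Prop :=
  (∀ g ∈ current_year_group, (PySem.Int.ofStr? (PySem.List.pyGetD ((PySem.Str.split? g "-").getD []) 1 "")).isSome = true)
  ∧ (current_year_group = [] ∨ ∀ it ∈ items, (PySem.Int.ofStr? it).isSome = true)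
  ∧ (current_year_group.length ≤ 4 ∨ items = [])
instance (items : List String) (current_year_group : List String) : Decidable (Pre_edit_year_list items current_year_group) := by unfold Pre_edit_year_list; infer_instance

def pvWitness_edit_year_list : List String × List String :=
  (["1985", "2005", "30"], ["2000-2010", "1990-1999", "1980-1989", "1-1979"])

def Spec_edit_year_list (items : List String) (current_year_group : List String) (out : List (List (String × String))) : Prop := out = edit_year_list_alt items current_year_group
instance (items : List String) (current_year_group : List String) (out : List (List (String × String))) : Decidable (Spec_edit_year_list items current_year_group out) := by unfold Spec_edit_year_list; infer_instance

-- ===== CLAIM (what is proved, stated in full; the proofs are below) =====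
def Claim_equal_edit_year_list : Prop := ∀ (items : List String) (current_year_group : List String), Dom_edit_year_list items current_year_group → Pre_edit_year_list items current_year_group → Spec_edit_year_list items current_year_group (edit_year_list items current_year_group)

-- ===== LEMMAS AND PROOFS =====

-- A's first loop, abstracted over the group string it reads
def pvStepA (st : List String × List Int) (g : String) : List String × List Int :=
  (st.1.filter (fun item => decide (pvInt item > pvThr g)),
   (if (st.1.filter (fun item => decide (pvInt item > pvThr g))).length < st.1.length then (1 : Int) else 0) :: st.2)

-- survivors of a suffix s of groups, and the 0/1 flags A computes for it
def pvF (items : List String) (s : List String) : List String :=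
  items.filter (fun it => s.all (fun g => decide (pvInt it > pvThr g)))

def pvFlags (items : List String) : List String → List Int
  | [] => []
  | g :: s =>
      (if ((pvF items s).filter (fun it => decide (pvInt it > pvThr g))).length < (pvF items s).length
       then (1 : Int) else 0) :: pvFlags items s

def pvOptMax : List Int → Option Int
  | [] => none
  | t :: ts => some (match pvOptMax ts with | none => t | some m => if t > m then t else m)

-- value of B's suffix-max fold
def pvSmax : List Int → List (Option Int) × Option Int
  | [] => ([], none)
  | t :: ts =>
      ((pvSmax ts).1 ++ [(pvSmax ts).2],
       some (match (pvSmax ts).2 with | none => t | some m => if t > m then t else m))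

lemma pv_map_range_rev {α : Type} (xs : List α) (d : α) :
    (List.range xs.length).map (fun (k : Nat) => PySem.List.pyGetD xs ((xs.length : Int) - (k : Int) - 1) d)
      = xs.reverse := by
  apply List.ext_getElem
  · simp
  · intro k h1 h2
    simp only [List.length_map, List.length_range] at h1
    simp only [List.getElem_map, List.getElem_range, List.getElem_reverse]
    rw [PySem.List.pyGetD_eq_getElem xs d (by omega) (by omega)]
    congr 1
    omega

lemma pv_foldA {α β : Type} (xs : List α) (d : α) (f : β → α → β) (init : β) :
    (PySem.List.pyRange 0 (xs.length : Int) 1).foldl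
      (fun st i => f st (PySem.List.pyGetD xs ((xs.length : Int) - i - 1) d)) init
      = xs.reverse.foldl f init := by
  rw [PySem.List.pyRange_zero_nat, List.foldl_map, ← pv_map_range_rev xs d, List.foldl_map]

lemma pv_loopA_inv (items : List String) (s : List String) :
    s.reverse.foldl pvStepA (items, ([] : List Int)) = (pvF items s, pvFlags items s) := by
  have pvF_cons : ∀ g s, pvF items (g :: s) = (pvF items s).filter (fun it => decide (pvInt it > pvThr g)) := by
    intro g s
    unfold pvF
    rw [List.filter_filter]
    apply List.filter_congr
    intro it _
    simp [List.all_cons]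
  induction s with
  | nil => simp [pvF, pvFlags]
  | cons g s ih =>
    rw [List.reverse_cons, List.foldl_append, ih]
    simp only [List.foldl_cons, List.foldl_nil, pvStepA, pvFlags, pvF_cons]

lemma pv_smax_fold (ts : List Int) :
    ts.reverse.foldl pvLoopB1 (([] : List (Option Int)), (none : Option Int)) = pvSmax ts := by
  induction ts with
  | nil => rfl
  | cons t ts ih =>
    rw [List.reverse_cons, List.foldl_append, ih]
    simp only [List.foldl_cons, List.foldl_nil, pvLoopB1, pvSmax]

lemma pv_smax_snd (ts : List Int) : (pvSmax ts).2 = pvOptMax ts := by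
  induction ts with
  | nil => rfl
  | cons t ts ih => simp only [pvSmax, pvOptMax, ih]

lemma pv_smax_fst_rev (ts : List Int) :
    (pvSmax ts).1.reverse = (List.range ts.length).map (fun p => pvOptMax (ts.drop (p + 1))) := by
  induction ts with
  | nil => simp [pvSmax]
  | cons t ts ih =>
    show ((pvSmax ts).1 ++ [(pvSmax ts).2]).reverse = _
    rw [List.reverse_append]
    simp only [List.reverse_cons, List.reverse_nil, List.nil_append, List.singleton_append,
      pv_smax_snd, ih, List.length_cons, List.range_succ_eq_map, List.map_cons, List.map_map]
    simp [Function.comp, List.drop_succ_cons]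

lemma pv_gtOpt_all (v : Int) (ts : List Int) :
    pvGtOpt v (pvOptMax ts) = ts.all (fun t => decide (v > t)) := by
  induction ts with
  | nil => rfl
  | cons t ts ih =>
    simp only [pvOptMax, List.all_cons, ← ih]
    cases h : pvOptMax ts with
    | none => simp [pvGtOpt]
    | some m =>
      simp only [pvGtOpt]
      split_ifs with ht
      · by_cases hv : v > t <;> by_cases hw : v > m <;> simp [hv, hw] <;> omega
      · by_cases hv : v > t <;> by_cases hw : v > m <;> simp [hv, hw] <;> omega

lemma pv_survivors_eq (items : List String) (cyg : List String) :
    items.filter (fun it => pvGtOpt (pvInt it) (pvOptMax (cyg.map pvThr))) = pvF items cyg := by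
  unfold pvF
  apply List.filter_congr
  intro it _
  rw [pv_gtOpt_all, List.all_map]
  rfl

lemma pv_flags_length (items : List String) (s : List String) :
    (pvFlags items s).length = s.length := by
  induction s with
  | nil => rfl
  | cons g s ih => simp [pvFlags, ih]

lemma pv_flags_getElem (items : List String) (s : List String) (p : Nat) (hp : p < s.length) :
    (pvFlags items s)[p]'(by rw [pv_flags_length]; exact hp) =
      if ((pvF items (s.drop (p + 1))).filter
            (fun it => decide (pvInt it > pvThr (s[p]'hp)))).length < (pvF items (s.drop (p + 1))).length
      then (1 : Int) else 0 := by
  induction s generalizing p with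
  | nil => simp at hp
  | cons g s ih =>
    cases p with
    | zero => simp [pvFlags]
    | succ q =>
      have hq : q < s.length := by simpa using hp
      simp only [pvFlags, List.getElem_cons_succ, List.drop_succ_cons]
      exact ih q hq

lemma pv_cond_iff (items : List String) (cyg : List String) (p : Nat) (hp : p < cyg.length) :
    (PySem.List.pyGetD (pvFlags items cyg) (p : Int) 0 = 1) ↔
      (items.any (fun it =>
          pvGtOpt (pvInt it) (PySem.List.pyGetD ((pvSmax (cyg.map pvThr)).1.reverse) (p : Int) none)
            && decide (pvInt it ≤ PySem.List.pyGetD (cyg.map pvThr) (p : Int) 0)) = true) := by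
  have hfl : p < (pvFlags items cyg).length := by rw [pv_flags_length]; exact hp
  rw [PySem.List.pyGetD_natCast, PySem.List.pyGetD_natCast, PySem.List.pyGetD_natCast,
    List.getD_eq_getElem _ _ hfl, pv_flags_getElem items cyg p hp,
    List.getD_eq_getElem _ _ (by simpa [pv_smax_fst_rev] using hp),
    List.getD_eq_getElem _ _ (by simpa using hp)]
  have hsm : ((pvSmax (cyg.map pvThr)).1.reverse)[p]'(by simpa [pv_smax_fst_rev] using hp)
      = pvOptMax ((cyg.drop (p + 1)).map pvThr) := by
    rw [List.getElem_of_eq (pv_smax_fst_rev (cyg.map pvThr))]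
    simp only [List.getElem_map, List.getElem_range]
    rw [← List.map_drop]
  have hth : ((cyg.map pvThr))[p]'(by simpa using hp) = pvThr (cyg[p]'hp) := by
    simp
  rw [hsm, hth]
  constructor
  · intro h
    have hC : ((pvF items (cyg.drop (p + 1))).filter
        (fun it => decide (pvInt it > pvThr (cyg[p]'hp)))).length < (pvF items (cyg.drop (p + 1))).length := by
      by_contra hC
      simp [hC] at h
    rw [List.length_filter_lt_length_iff_exists] at hC
    obtain ⟨x, hxmem, hxnot⟩ := hC
    rw [List.any_eq_true]
    unfold pvF at hxmem
    rw [List.mem_filter] at hxmem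
    refine ⟨x, hxmem.1, ?_⟩
    rw [pv_gtOpt_all, List.all_map]
    simp only [Bool.and_eq_true]
    refine ⟨hxmem.2, ?_⟩
    simp only [decide_eq_true_eq] at hxnot ⊢
    omega
  · intro h
    rw [List.any_eq_true] at h
    obtain ⟨x, hxmem, hx⟩ := h
    rw [pv_gtOpt_all, List.all_map] at hx
    simp only [Bool.and_eq_true, decide_eq_true_eq] at hx
    have hC : ((pvF items (cyg.drop (p + 1))).filter
        (fun it => decide (pvInt it > pvThr (cyg[p]'hp)))).length < (pvF items (cyg.drop (p + 1))).length := by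
      rw [List.length_filter_lt_length_iff_exists]
      refine ⟨x, ?_, by simp; omega⟩
      unfold pvF
      rw [List.mem_filter]
      exact ⟨hxmem, hx.1⟩
    simp [hC]

lemma pv_ports_eq (items : List String) (cyg : List String) :
    edit_year_list items cyg = edit_year_list_alt items cyg := by
  have hloop1 : (PySem.List.pyRange 0 ((cyg.length : Int)) 1).foldl (pvLoopA1 cyg ((cyg.length : Int))) (items, ([] : List Int)) = (pvF items cyg, pvFlags items cyg) := by
    rw [show pvLoopA1 cyg ((cyg.length : Int))
        = (fun st i => pvStepA st (PySem.List.pyGetD cyg ((cyg.length : Int) - i - 1) "")) from rfl,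
      pv_foldA cyg "" pvStepA (items, ([] : List Int))]
    exact pv_loopA_inv items cyg
  simp only [edit_year_list, edit_year_list_alt]
  rw [hloop1, pv_smax_fold (cyg.map pvThr), pv_smax_snd, pv_survivors_eq]
  simp only [pv_flags_length, List.length_map]
  apply PySem.List.foldl_congr_mem
  intro acc i hi
  rw [PySem.List.mem_pyRange_one] at hi
  obtain ⟨h0, hlt⟩ := hi
  have hip : i = ((i.toNat : Nat) : Int) := (Int.toNat_of_nonneg h0).symm
  set p := i.toNat with hpdef
  have hp : p < cyg.length := by omega
  rw [hip]
  simp only [pvLoopA2, pvLoopB2]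
  by_cases hc : PySem.List.pyGetD (pvFlags items cyg) ((p : Nat) : Int) 0 = 1
  · rw [if_pos hc, if_pos ((pv_cond_iff items cyg p hp).mp hc)]
  · rw [if_neg hc, if_neg (fun h => hc ((pv_cond_iff items cyg p hp).mpr h))]

-- ===== VERDICT (by name: the statement is the Claim_ definition above) =====
theorem edit_year_list_spec : Claim_equal_edit_year_list := by
  intro items cyg _ _
  unfold Spec_edit_year_list
  exact pv_ports_eq items cyg
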